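-- pv_equiv track=rewrite | github.com/noiehoie/gpucall | gpucall/tuple_audit.py | _surface_summary
-- ===== SOURCE A (Python) =====
-- from typing import Any, Mapping
--
-- def _surface_summary(active_rows: list[dict[str, Any]], candidate_rows: list[dict[str, Any]]) -> dict[str, Any]:
--     summary: dict[str, Any] = {"active": {}, "candidate": {}}
--     for bucket, rows in (("active", active_rows), ("candidate", candidate_rows)):
--         counts: dict[str, int] = {}
--         for row in rows:
--             tuple_data = row.get("tuple") if isinstance(row.get("tuple"), dict) else {}
--             surface = str(tuple_data.get("execution_surface") or "unknown")
--             counts[surface] = counts.get(surface, 0) + 1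
--         summary[bucket] = dict(sorted(counts.items()))
--     return summary
-- ===== SOURCE B (Python) =====
-- def _surface_summary(active_rows, candidate_rows):
--     def bucket(rows):
--         surfaces = sorted(
--             str((row.get("tuple") if isinstance(row.get("tuple"), dict) else {}).get("execution_surface") or "unknown")
--             for row in rows
--         )
--         out = {}
--         i = 0
--         n = len(surfaces)
--         while i < n:
--             j = i
--             while j < n and surfaces[j] == surfaces[i]:
--                 j += 1
--             out[surfaces[i]] = j - i
--             i = j
--         return out
--     return {"active": bucket(active_rows), "candidate": bucket(candidate_rows)}
-- ===== Notes on version B (the rewrite author's own statement) =====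
-- stated objective: alternative
-- what changed: Per bucket, A increments a counting dict while scanning rows and then sorts the dict's items; B first maps rows to their surface strings, sorts that list, and emits one (key, run length) pair per run in a single scan of the sorted list.
import Mathlib
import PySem

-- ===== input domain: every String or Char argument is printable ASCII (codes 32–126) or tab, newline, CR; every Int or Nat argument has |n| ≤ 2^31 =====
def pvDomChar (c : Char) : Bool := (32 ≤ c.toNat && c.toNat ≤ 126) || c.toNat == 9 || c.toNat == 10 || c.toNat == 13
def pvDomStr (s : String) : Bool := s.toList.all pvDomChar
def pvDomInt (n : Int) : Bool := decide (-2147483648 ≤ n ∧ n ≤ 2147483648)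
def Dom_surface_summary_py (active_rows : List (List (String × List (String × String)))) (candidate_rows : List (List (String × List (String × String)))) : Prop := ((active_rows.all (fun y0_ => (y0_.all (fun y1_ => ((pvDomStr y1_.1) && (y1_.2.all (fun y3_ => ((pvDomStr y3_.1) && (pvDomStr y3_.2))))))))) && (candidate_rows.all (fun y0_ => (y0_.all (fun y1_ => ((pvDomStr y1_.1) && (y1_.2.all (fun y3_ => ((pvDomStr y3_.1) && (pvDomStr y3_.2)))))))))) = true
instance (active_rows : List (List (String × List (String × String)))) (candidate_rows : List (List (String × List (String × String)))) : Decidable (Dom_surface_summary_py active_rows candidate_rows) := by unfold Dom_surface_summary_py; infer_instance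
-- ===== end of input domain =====

-- B replaces A's per-bucket counting dict + sorted(items) by "sort the surface strings, then
-- run-length-scan the sorted list" (a different decomposition; same cost class, 'alternative').

-- ===== PORT A =====
-- shared surface extraction: str(tuple_data.get('execution_surface') or 'unknown') with the
-- isinstance-dict guard (in the typed domain the value under 'tuple', when present, IS a dict)
def surfaceOf (row : List (String × List (String × String))) : String :=
  let tuple_data : List (String × String) :=
    match (PySem.Dict.mk row).get? "tuple" with
    | some d => d
    | none   => []
  match (PySem.Dict.mk tuple_data).get? "execution_surface" with
  | none   => "unknown"
  | some s => if s == "" then "unknown" else s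

def surface_summary_py (active_rows : List (List (String × List (String × String)))) (candidate_rows : List (List (String × List (String × String)))) : List (String × List (String × Int)) :=
  let summary : PySem.Dict String (List (String × Int)) :=
    (PySem.Dict.empty.insert "active" []).insert "candidate" []
  let summary :=
    [("active", active_rows), ("candidate", candidate_rows)].foldl
      (fun s bp =>
        let counts : PySem.Dict String Int :=
          bp.2.foldl
            (fun d row =>
              let surface := surfaceOf row
              d.insert surface (d.getD surface 0 + 1))
            PySem.Dict.empty
        s.insert bp.1 (PySem.List.sorted2 counts.items Prod.fst Prod.snd))
      summary
  summary.items

-- ===== PORT B =====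
-- Source B's index scan 'while j < n and surfaces[j] == surfaces[i]' over the sorted list, as the
-- obvious structural recursion: one run of equal elements per step
def runLengthAlt (xs : List String) : List (String × Int) :=
  match xs with
  | [] => []
  | x :: rest =>
    (x, 1 + ((rest.takeWhile (· == x)).length : Int)) :: runLengthAlt (rest.dropWhile (· == x))
termination_by xs.length
decreasing_by
  simp only [List.length_cons]
  exact Nat.lt_succ_of_le (List.dropWhile_sublist _).length_le

def bucketAlt (rows : List (List (String × List (String × String)))) : List (String × Int) :=
  runLengthAlt (PySem.List.sorted (rows.map surfaceOf) (fun s => s))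

def surface_summary_py_alt (active_rows : List (List (String × List (String × String)))) (candidate_rows : List (List (String × List (String × String)))) : List (String × List (String × Int)) :=
  [("active", bucketAlt active_rows), ("candidate", bucketAlt candidate_rows)]

-- ===== PRECONDITION & SPEC =====
def Spec_surface_summary_py (active_rows : List (List (String × List (String × String)))) (candidate_rows : List (List (String × List (String × String)))) (out : List (String × List (String × Int))) : Prop := out = surface_summary_py_alt active_rows candidate_rows
instance (active_rows : List (List (String × List (String × String)))) (candidate_rows : List (List (String × List (String × String)))) (out : List (String × List (String × Int))) : Decidable (Spec_surface_summary_py active_rows candidate_rows out) := by unfold Spec_surface_summary_py; infer_instance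

-- ===== CLAIM (what is proved, stated in full; the proofs are below) =====
def Claim_equal_surface_summary_py : Prop := ∀ (active_rows : List (List (String × List (String × String)))) (candidate_rows : List (List (String × List (String × String)))), Dom_surface_summary_py active_rows candidate_rows → Spec_surface_summary_py active_rows candidate_rows (surface_summary_py active_rows candidate_rows)

-- ===== LEMMAS AND PROOFS =====

lemma insertBy_congr_mem {α : Type} (p q : α → α → Bool) (x : α) (acc : List α)
    (h : ∀ b ∈ acc, p x b = q x b) :
    PySem.List.insertBy p x acc = PySem.List.insertBy q x acc := by
  induction acc with
  | nil => rfl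
  | cons y ys ih =>
    rw [PySem.List.insertBy, PySem.List.insertBy]
    rw [h y (by simp)]
    by_cases hq : q x y = true
    · simp [hq]
    · simp only [Bool.not_eq_true] at hq
      simp [hq, ih (fun b hb => h b (by simp [hb]))]

lemma foldl_insertBy_congr {α : Type} (p q : α → α → Bool) (S : List α)
    (h : ∀ a ∈ S, ∀ b ∈ S, p a b = q a b) :
    ∀ (xs acc : List α), (∀ a ∈ xs, a ∈ S) → (∀ a ∈ acc, a ∈ S) →
    xs.foldl (fun acc x => PySem.List.insertBy p x acc) acc
      = xs.foldl (fun acc x => PySem.List.insertBy q x acc) acc := by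
  intro xs
  induction xs with
  | nil => intro acc _ _; rfl
  | cons x xs ih =>
    intro acc hxs hacc
    have hxS : x ∈ S := hxs x (by simp)
    simp only [List.foldl_cons]
    rw [insertBy_congr_mem p q x acc (fun b hb => h x hxS b (hacc b hb))]
    refine ih _ (fun a ha => hxs a (by simp [ha])) ?_
    intro a ha
    rcases (PySem.List.mem_insertBy q x a acc).1 ha with h1 | h1
    · exact h1 ▸ hxS
    · exact hacc a h1

lemma sorted2_eq_sorted_fst (xs : List (String × Int))
    (hnd : (xs.map Prod.fst).Nodup) :
    PySem.List.sorted2 xs Prod.fst Prod.snd = PySem.List.sorted xs Prod.fst := by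
  show xs.foldl (fun acc x => PySem.List.insertBy
      (fun a b => decide (a.1 < b.1) || (!decide (b.1 < a.1) && decide (a.2 < b.2))) x acc) []
    = xs.foldl (fun acc x => PySem.List.insertBy (fun a b => decide (a.1 < b.1)) x acc) []
  refine foldl_insertBy_congr _ _ xs ?_ xs [] (fun a ha => ha) (by simp)
  intro a ha b hb
  by_cases hab : a = b
  · subst hab; simp
  · have hfst : a.1 ≠ b.1 := fun he => hab (List.inj_on_of_nodup_map hnd ha hb he)
    rcases hfst.lt_or_gt with hlt | hgt
    · simp [hlt]
    · simp [hgt, not_lt_of_gt hgt]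

-- collapsing a run of copies of x into the accumulator [x]
lemma foldl_add_all_eq (x : String) :
    ∀ (run : List String), (∀ y ∈ run, y = x) →
      run.foldl PySem.Set.add [x] = [x] := by
  intro run
  induction run with
  | nil => intro _; rfl
  | cons y ys ih =>
    intro h
    have hy : y = x := h y (by simp)
    subst hy
    simp only [List.foldl_cons]
    have : PySem.Set.add [y] y = [y] := by
      simp [PySem.Set.add, PySem.Set.contains]
    rw [this]
    exact ih (fun z hz => h z (by simp [hz]))

lemma foldl_add_cons_of_not_mem (x : String) :
    ∀ (t s : List String), x ∉ t →
      t.foldl PySem.Set.add (x :: s) = x :: t.foldl PySem.Set.add s := by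
  intro t
  induction t with
  | nil => intro s _; rfl
  | cons y ys ih =>
    intro s hx
    have hyx : ¬ (x = y) := by intro he; exact hx (by simp [he])
    simp only [List.foldl_cons]
    have hbeq : (y == x) = false := beq_eq_false_iff_ne.mpr (fun he => hyx he.symm)
    have hstep : PySem.Set.add (x :: s) y =
        x :: PySem.Set.add s y := by
      simp only [PySem.Set.add, PySem.Set.contains, List.contains_cons, hbeq, Bool.false_or]
      split_ifs <;> rfl
    rw [hstep, ih _ (fun hm => hx (by simp [hm]))]

lemma not_mem_dropWhile_beq (x : String) :
    ∀ (rest : List String), (∀ y ∈ rest, x ≤ y) → rest.Pairwise (· ≤ ·) →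
      x ∉ rest.dropWhile (· == x) := by
  intro rest
  induction rest with
  | nil => intro _ _; simp
  | cons y ys ih =>
    intro hx hp
    rcases List.pairwise_cons.1 hp with ⟨hy, hys⟩
    by_cases h : y = x
    · subst h
      rw [List.dropWhile_cons_of_pos (by simp)]
      exact ih hy hys
    · rw [List.dropWhile_cons_of_neg (by simp [h])]
      have hxy : x < y := lt_of_le_of_ne (hx y (by simp)) (fun he => h he.symm)
      intro hmem
      rcases List.mem_cons.1 hmem with he | hm
      · exact h he.symm
      · exact absurd (hy x hm) (not_le_of_gt hxy)

lemma runLengthAlt_eq :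
    ∀ (P : List String), P.Pairwise (· ≤ ·) →
      runLengthAlt P = (PySem.Set.ofList P).map (fun k => (k, (P.count k : Int))) := by
  intro P
  induction P using runLengthAlt.induct with
  | case1 => intro _; rw [runLengthAlt]; rfl
  | case2 x rest ih =>
    intro hP
    rcases List.pairwise_cons.1 hP with ⟨hx, hrest⟩
    set run := rest.takeWhile (· == x) with hrundef
    set t := rest.dropWhile (· == x) with htdef
    have hsplit : run ++ t = rest := List.takeWhile_append_dropWhile
    have hrun : ∀ y ∈ run, y = x := by
      intro y hy
      rw [hrundef] at hy
      exact eq_of_beq (List.mem_takeWhile_imp (p := fun z => z == x) hy)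
    have hxt : x ∉ t := not_mem_dropWhile_beq x rest hx hrest
    have htp : t.Pairwise (· ≤ ·) := List.Pairwise.sublist (List.dropWhile_sublist _) hrest
    have htgt : ∀ z ∈ t, x < z := by
      intro z hz
      have hzr : z ∈ rest := (List.dropWhile_sublist (· == x)).mem hz
      exact lt_of_le_of_ne (hx z hzr) (fun he => hxt (he ▸ hz))
    -- ofList (x :: rest) = x :: ofList t
    have hofl : PySem.Set.ofList (x :: rest) = x :: PySem.Set.ofList t := by
      rw [PySem.Set.ofList_eq_foldl, ← hsplit]
      show (run ++ t).foldl PySem.Set.add (PySem.Set.add [] x) = _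
      have : PySem.Set.add ([] : List String) x = [x] := rfl
      rw [this, List.foldl_append, foldl_add_all_eq x run hrun,
        foldl_add_cons_of_not_mem x t [] hxt, ← PySem.Set.ofList_eq_foldl]
    -- counts
    have hcx : (x :: rest).count x = run.length + 1 := by
      rw [← hsplit, List.count_cons_self, List.count_append,
        List.count_eq_length.2 (fun b hb => (hrun b hb).symm),
        List.count_eq_zero.2 hxt]
    have hck : ∀ k ∈ t, (x :: rest).count k = t.count k := by
      intro k hk
      have hkx : k ≠ x := fun he => hxt (he ▸ hk)
      have hkrun : k ∉ run := fun hm => hkx (hrun k hm)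
      rw [← hsplit, List.count_cons, List.count_append, List.count_eq_zero.2 hkrun]
      simp [Ne.symm hkx]
    rw [runLengthAlt]
    rw [ih htp, hofl]
    simp only [List.map_cons, ← hrundef]
    have hmap : (PySem.Set.ofList t).map (fun k => (k, ((x :: rest).count k : Int)))
        = (PySem.Set.ofList t).map (fun k => (k, (t.count k : Int))) :=
      List.map_congr_left (fun k hk => by
        have hk' : k ∈ t := by rwa [PySem.Set.mem_ofList] at hk
        rw [hck k hk'])
    rw [hcx, hmap]
    push_cast
    simp [add_comm]

-- the per-bucket equality: A's dict(sorted(counter.items())) = B's run-length over the sorted list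
lemma bucket_eq (rows : List (List (String × List (String × String)))) :
    PySem.List.sorted2
      (rows.foldl
        (fun d row =>
          let surface := surfaceOf row
          d.insert surface (d.getD surface 0 + 1))
        PySem.Dict.empty).items Prod.fst Prod.snd
    = bucketAlt rows := by
  set L := rows.map surfaceOf with hL
  have hfold :
      rows.foldl
        (fun d row =>
          let surface := surfaceOf row
          d.insert surface (d.getD surface 0 + 1))
        PySem.Dict.empty
      = PySem.Dict.counter L := by
    rw [hL, ← PySem.Dict.foldl_insert_getD_add_one_eq_counter, List.foldl_map]
  rw [hfold]
  set S := PySem.List.sorted L (fun s => s) with hS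
  have hSpair : S.Pairwise (· ≤ ·) := PySem.List.sorted_pairwise L (fun s => s)
  -- sorted(set(L)) = ofList S
  have hperm : (PySem.Set.ofList S).Perm (PySem.Set.ofList L) := by
    rw [List.perm_ext_iff_of_nodup (PySem.Set.nodup_ofList S) (PySem.Set.nodup_ofList L)]
    intro a
    rw [PySem.Set.mem_ofList, PySem.Set.mem_ofList, hS, PySem.List.mem_sorted]
  have hsubl : (PySem.Set.ofList S).Sublist S := by
    clear hSpair hperm hS
    induction S with
    | nil => exact List.nil_sublist []
    | cons y ys ihy =>
      rw [PySem.Set.ofList_cons]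
      simp only [PySem.Set.discard]
      exact List.Sublist.cons₂ y (List.Sublist.trans List.filter_sublist ihy)
  have hlt : (PySem.Set.ofList S).Pairwise (· < ·) := by
    have hle : (PySem.Set.ofList S).Pairwise (· ≤ ·) := hSpair.sublist hsubl
    have hne : (PySem.Set.ofList S).Pairwise (· ≠ ·) :=
      PySem.Set.nodup_ofList S
    exact (hle.and hne).imp (fun h => lt_of_le_of_ne h.1 h.2)
  have hsortedSet : PySem.List.sorted (PySem.Set.ofList L) (fun s => s)
      = PySem.Set.ofList S :=
    PySem.List.sorted_eq_of_perm_of_pairwise_lt _ _ _ hperm hlt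
  -- A side
  have hA : PySem.List.sorted2 (PySem.Dict.counter L).items Prod.fst Prod.snd
      = (PySem.Set.ofList S).map (fun k => (k, (L.count k : Int))) := by
    have hnd : ((PySem.Dict.counter L).items.map Prod.fst).Nodup :=
      PySem.Dict.nodup_keys_counter L
    rw [sorted2_eq_sorted_fst _ hnd]
    refine PySem.List.sorted_eq_of_perm_of_pairwise_lt _ _ _ ?_ ?_
    · rw [PySem.Dict.items_counter]
      exact (hperm.map (fun k => (k, (L.count k : Int))))
    · exact hlt.map _ (fun a b h => h)
  -- B side
  have hB : bucketAlt rows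
      = (PySem.Set.ofList S).map (fun k => (k, (L.count k : Int))) := by
    show runLengthAlt S = _
    rw [runLengthAlt_eq S hSpair]
    refine List.map_congr_left (fun k _ => ?_)
    rw [(PySem.List.sorted_perm L (fun s => s) false).count_eq k]
  rw [hA, hB]

-- ===== VERDICT (by name: the statement is the Claim_ definition above) =====
theorem surface_summary_py_spec : Claim_equal_surface_summary_py := by
  intro active_rows candidate_rows _
  show surface_summary_py active_rows candidate_rows
      = surface_summary_py_alt active_rows candidate_rows
  show [("active", PySem.List.sorted2
          (active_rows.foldl
            (fun d row =>
              let surface := surfaceOf row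
              d.insert surface (d.getD surface 0 + 1))
            PySem.Dict.empty).items Prod.fst Prod.snd),
        ("candidate", PySem.List.sorted2
          (candidate_rows.foldl
            (fun d row =>
              let surface := surfaceOf row
              d.insert surface (d.getD surface 0 + 1))
            PySem.Dict.empty).items Prod.fst Prod.snd)]
      = [("active", bucketAlt active_rows), ("candidate", bucketAlt candidate_rows)]
  rw [bucket_eq active_rows, bucket_eq candidate_rows]
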